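-- pv_equiv track=rewrite | github.com/Abhijeet-kumar-soni/Financial-advisor | chatbot_backend.py | _find_goal_by_name
-- ===== SOURCE A (Python) =====
-- def _find_goal_by_name(goals: list, query: str) -> tuple:
--     """
--     Find which goal the user is referring to. Returns (index, goal_dict) or (-1, None).
--     Tries exact match first, then substring match, then first goal as fallback
--     if only one goal exists.
--     """
--     q = query.lower()
--
--     # Exact match
--     for i, g in enumerate(goals):
--         if g["name"].lower() == q.strip():
--             return i, g
--
--     # Substring match
--     for i, g in enumerate(goals):
--         if g["name"].lower() in q or q in g["name"].lower():
--             return i, g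
--
--     # Single goal — assume that's the one
--     if len(goals) == 1:
--         return 0, goals[0]
--
--     return -1, None
-- ===== SOURCE B (Python) =====
-- def _find_goal_by_name(goals: list, query: str) -> tuple:
--     """Single pass: return first exact match immediately; remember the first
--     substring match as a candidate; fall back to candidate / single goal."""
--     q = query.lower()
--     qs = q.strip()
--     cand = None
--     for i, g in enumerate(goals):
--         name = g["name"].lower()
--         if name == qs:
--             return i, g
--         if cand is None and (name in q or q in name):
--             cand = (i, g)
--     if cand is not None:
--         return cand
--     if len(goals) == 1:
--         return 0, goals[0]
--     return -1, None
-- ===== Notes on version B (the rewrite author's own statement) =====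
-- stated objective: simpler
-- what changed: Replaces A's two sequential enumerate passes (exact pass, then substring pass) with one pass that lowercases each name once, returns an exact match immediately and records only the first substring candidate for use after the loop; Pre_ excludes only the inputs where Python raises KeyError (a goal dict without a 'name' key reached by the scan).
import Mathlib
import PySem

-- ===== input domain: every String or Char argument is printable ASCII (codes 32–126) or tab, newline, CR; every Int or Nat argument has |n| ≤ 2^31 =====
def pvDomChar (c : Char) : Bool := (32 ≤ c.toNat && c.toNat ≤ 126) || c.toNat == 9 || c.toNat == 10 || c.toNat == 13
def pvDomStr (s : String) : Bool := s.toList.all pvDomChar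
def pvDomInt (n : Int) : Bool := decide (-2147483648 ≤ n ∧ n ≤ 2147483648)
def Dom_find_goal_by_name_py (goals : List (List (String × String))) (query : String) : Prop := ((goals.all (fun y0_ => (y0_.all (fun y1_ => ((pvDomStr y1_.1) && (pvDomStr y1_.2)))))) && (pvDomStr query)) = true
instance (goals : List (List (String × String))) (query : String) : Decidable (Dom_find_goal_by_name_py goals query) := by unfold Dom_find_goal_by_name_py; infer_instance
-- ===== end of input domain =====

-- B replaces A's two sequential passes by a single pass that returns an exact match at once and
-- remembers the first substring candidate; return values agree wherever Python A does not raise KeyError.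

-- ===== PORT A =====
-- g["name"].lower(); under Pre_ every goal has a "name" key, so getD "" is exact there.
def pvGoalName (g : List (String × String)) : String :=
  PySem.Str.lower (((PySem.Dict.mk g).get? "name").getD "")

-- first enumerate loop of A: exact match against q.strip()
def pvExactLoop (goals : List (List (String × String))) (qs : String) (i : Int) :
    Option (Int × List (String × String)) :=
  match goals with
  | [] => none
  | g :: rest => if pvGoalName g = qs then some (i, g) else pvExactLoop rest qs (i + 1)

-- second enumerate loop of A: substring match against q
def pvSubLoop (goals : List (List (String × String))) (q : String) (i : Int) :
    Option (Int × List (String × String)) :=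
  match goals with
  | [] => none
  | g :: rest =>
    if PySem.Str.isIn (pvGoalName g) q || PySem.Str.isIn q (pvGoalName g) then some (i, g)
    else pvSubLoop rest q (i + 1)

def find_goal_by_name_py (goals : List (List (String × String))) (query : String) :
    Int × (Option (List (String × String))) :=
  let q := PySem.Str.lower query
  match pvExactLoop goals (PySem.Str.strip q) 0 with
  | some (i, g) => (i, some g)
  | none =>
    match pvSubLoop goals q 0 with
    | some (i, g) => (i, some g)
    | none => if goals.length = 1 then (0, goals.head?) else (-1, none)

-- ===== PORT B =====
-- B's single for-loop over enumerate(goals), transliterated as a foldl over goals.zipIdx carrying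
-- the state (exact?, cand?): `exact?` encodes the early return (once set, later items are ignored),
-- `cand?` is the recorded first substring candidate.
def pvStepB (q qs : String)
    (st : Option (Int × List (String × String)) × Option (Int × List (String × String)))
    (p : List (String × String) × Nat) :
    Option (Int × List (String × String)) × Option (Int × List (String × String)) :=
  match st.1 with
  | some _ => st
  | none =>
    let name := PySem.Str.lower (((PySem.Dict.mk p.1).get? "name").getD "")
    if name = qs then (some ((p.2 : Int), p.1), st.2)
    else if st.2.isNone && (PySem.Str.isIn name q || PySem.Str.isIn q name) then
      (none, some ((p.2 : Int), p.1))
    else st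

def find_goal_by_name_py_alt (goals : List (List (String × String))) (query : String) :
    Int × (Option (List (String × String))) :=
  let q := PySem.Str.lower query
  let qs := PySem.Str.strip q
  let st := goals.zipIdx.foldl (pvStepB q qs) (none, none)
  match st.1.or st.2 with
  | some (i, g) => (i, some g)
  | none => if goals.length = 1 then (0, goals.head?) else (-1, none)

-- ===== PRECONDITION & SPEC =====
-- Pre_ excludes exactly the inputs where Python A raises KeyError: a goal dict without a "name" key
-- that the scan actually reaches, i.e. one not preceded by a goal whose lowered name equals the
-- stripped lowered query (an earlier exact match returns before the malformed dict is reached).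
def Pre_find_goal_by_name_py (goals : List (List (String × String))) (query : String) : Prop :=
  ∀ p ∈ goals.zipIdx, ((PySem.Dict.mk p.1).get? "name").isSome = false →
    ∃ p2 ∈ goals.zipIdx, p2.2 < p.2 ∧
      ((PySem.Dict.mk p2.1).get? "name").map PySem.Str.lower =
        some (PySem.Str.strip (PySem.Str.lower query))
instance (goals : List (List (String × String))) (query : String) : Decidable (Pre_find_goal_by_name_py goals query) := by unfold Pre_find_goal_by_name_py; infer_instance

def pvWitness_find_goal_by_name_py : (List (List (String × String))) × String :=
  ([[("name", "Car")], [("name", "House")]], "buy a house")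

def Spec_find_goal_by_name_py (goals : List (List (String × String))) (query : String) (out : Int × (Option (List (String × String)))) : Prop := out = find_goal_by_name_py_alt goals query
instance (goals : List (List (String × String))) (query : String) (out : Int × (Option (List (String × String)))) : Decidable (Spec_find_goal_by_name_py goals query out) := by unfold Spec_find_goal_by_name_py; infer_instance

-- ===== CLAIM (what is proved, stated in full; the proofs are below) =====
def Claim_equal_find_goal_by_name_py : Prop := ∀ (goals : List (List (String × String))) (query : String), Dom_find_goal_by_name_py goals query → Pre_find_goal_by_name_py goals query → Spec_find_goal_by_name_py goals query (find_goal_by_name_py goals query)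

-- ===== LEMMAS AND PROOFS =====

-- once the exact component is set the fold is constant (the encoded early return)
theorem pvFold_done (l : List (List (String × String) × Nat)) (q qs : String)
    (e : Int × List (String × String)) (c : Option (Int × List (String × String))) :
    l.foldl (pvStepB q qs) (some e, c) = (some e, c) := by
  induction l with
  | nil => rfl
  | cons p rest ih => simp [pvStepB, ih]

-- the fold started with (none, cand) combines to: A's exact pass, else cand, else A's substring pass
theorem pvFold_spec (goals : List (List (String × String))) (q qs : String) (i : Nat)
    (c : Option (Int × List (String × String))) :
    (let st := (goals.zipIdx i).foldl (pvStepB q qs) (none, c)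
     st.1.or st.2) =
      match pvExactLoop goals qs (i : Int) with
      | some r => some r
      | none => c.or (pvSubLoop goals q (i : Int)) := by
  induction goals generalizing i c with
  | nil => cases c <;> simp [pvExactLoop, pvSubLoop]
  | cons g rest ih =>
    simp only [List.zipIdx_cons, List.foldl_cons]
    have hg : PySem.Str.lower (((PySem.Dict.mk g).get? "name").getD "") = pvGoalName g := rfl
    by_cases h : pvGoalName g = qs
    · have hstep : pvStepB q qs (none, c) (g, i) = (some ((i : Int), g), c) := by
        unfold pvStepB
        dsimp only
        rw [hg, if_pos h]
      rw [hstep, pvFold_done]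
      simp [pvExactLoop, h]
    · by_cases hs : (PySem.Str.isIn (pvGoalName g) q || PySem.Str.isIn q (pvGoalName g)) = true
      · cases c with
        | none =>
          have hstep : pvStepB q qs (none, none) (g, i) = (none, some ((i : Int), g)) := by
            unfold pvStepB
            dsimp only
            rw [hg, if_neg h]
            have hs2 : PySem.Chars.isIn (pvGoalName g).toList q.toList = true ∨
                PySem.Chars.isIn q.toList (pvGoalName g).toList = true := by simpa using hs
            simp
            intro h1
            exact hs2.resolve_left (by simp [h1])
          rw [hstep]
          have h2 := ih (i+1) (some ((i : Int), g))
          push_cast at h2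
          rw [h2]
          simp only [pvExactLoop, pvSubLoop, if_neg h, if_pos hs]
          cases hE : pvExactLoop rest qs ((i : Int) + 1) <;> simp
        | some cv =>
          have hstep : pvStepB q qs (none, some cv) (g, i) = (none, some cv) := by
            unfold pvStepB
            dsimp only
            rw [hg, if_neg h]
            simp
          rw [hstep]
          have h2 := ih (i+1) (some cv)
          push_cast at h2
          rw [h2]
          simp only [pvExactLoop, if_neg h]
          cases hE : pvExactLoop rest qs ((i : Int) + 1) <;> simp
      · have hstep : pvStepB q qs (none, c) (g, i) = (none, c) := by
          unfold pvStepB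
          cases c with
          | none =>
            dsimp only
            rw [hg, if_neg h]
            have hs2 : PySem.Chars.isIn (pvGoalName g).toList q.toList = false ∧
                PySem.Chars.isIn q.toList (pvGoalName g).toList = false := by simpa using hs
            simp [hs2.1, hs2.2]
          | some cv =>
            dsimp only
            rw [hg, if_neg h]
            simp
        rw [hstep]
        have h2 := ih (i+1) c
        push_cast at h2
        rw [h2]
        simp only [pvExactLoop, pvSubLoop, if_neg h, if_neg hs]

-- ===== VERDICT (by name: the statement is the Claim_ definition above) =====
theorem find_goal_by_name_py_spec : Claim_equal_find_goal_by_name_py := by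
  intro goals query _ _
  unfold Spec_find_goal_by_name_py
  show find_goal_by_name_py goals query = find_goal_by_name_py_alt goals query
  have h := pvFold_spec goals (PySem.Str.lower query)
    (PySem.Str.strip (PySem.Str.lower query)) 0 none
  simp only [Nat.cast_zero] at h
  show (match pvExactLoop goals (PySem.Str.strip (PySem.Str.lower query)) 0 with
    | some (i, g) => ((i : Int), some g)
    | none =>
      match pvSubLoop goals (PySem.Str.lower query) 0 with
      | some (i, g) => ((i : Int), some g)
      | none => if goals.length = 1 then ((0 : Int), goals.head?) else (-1, none)) =
    (match ((goals.zipIdx.foldl (pvStepB (PySem.Str.lower query)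
        (PySem.Str.strip (PySem.Str.lower query))) (none, none)).1.or
        (goals.zipIdx.foldl (pvStepB (PySem.Str.lower query)
        (PySem.Str.strip (PySem.Str.lower query))) (none, none)).2) with
    | some (i, g) => ((i : Int), some g)
    | none => if goals.length = 1 then ((0 : Int), goals.head?) else (-1, none))
  rw [h]
  cases hE : pvExactLoop goals (PySem.Str.strip (PySem.Str.lower query)) 0 <;>
    cases hS : pvSubLoop goals (PySem.Str.lower query) 0 <;> simp [Option.or]
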